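-- pv_equiv track=rewrite | github.com/suman03-en/WebServer-Python | server_v1.py | match_location
-- ===== SOURCE A (Python) =====
-- def match_location(locations, uri: str):
--     """
--     Finds the location block with the longest prefix match.
--     """
--
--     matched_location = None
--     longest_prefix = -1
--     for path, root_dir in locations.items():
--         if uri.startswith(path) and len(path) > longest_prefix:
--             matched_location = root_dir
--             longest_prefix = len(path)
--     return matched_location
-- ===== SOURCE B (Python) =====
-- def match_location(locations, uri: str):
--     """
--     Finds the location block with the longest prefix match.
--     """
--     for path, root_dir in sorted(locations.items(), key=lambda item: len(item[0]), reverse=True):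
--         if uri.startswith(path):
--             return root_dir
--     return None
-- ===== Notes on version B (the rewrite author's own statement) =====
-- stated objective: alternative
-- what changed: Replaces the running-max single scan with a sort-then-short-circuit scan: the items are stably sorted by path length descending once, then the first item whose path is a prefix of the uri is returned (stability reproduces A's strict-> first-wins tie-break).
import Mathlib
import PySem

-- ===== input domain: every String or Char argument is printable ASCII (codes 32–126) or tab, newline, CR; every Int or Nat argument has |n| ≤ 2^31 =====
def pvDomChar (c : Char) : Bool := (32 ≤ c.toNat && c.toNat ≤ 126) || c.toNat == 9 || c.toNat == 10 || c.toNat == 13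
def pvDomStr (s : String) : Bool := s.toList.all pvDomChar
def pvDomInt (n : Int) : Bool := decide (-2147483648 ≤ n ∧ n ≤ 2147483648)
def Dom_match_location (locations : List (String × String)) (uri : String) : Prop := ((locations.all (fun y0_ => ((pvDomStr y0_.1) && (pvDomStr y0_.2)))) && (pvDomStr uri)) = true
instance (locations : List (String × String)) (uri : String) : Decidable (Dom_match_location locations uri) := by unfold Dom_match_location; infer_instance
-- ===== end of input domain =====

-- B sorts the paths by length descending (stable) and returns the first prefix match; A's running-max loop disappears.

-- ===== PORT A =====
-- literal transliteration of A's for-loop over (path, root_dir) with state (matched_location, longest_prefix)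
def match_location (locations : List (String × String)) (uri : String) : Option String :=
  (locations.foldl
    (fun (st : Option String × Int) pr =>
      if PySem.Str.startswith uri pr.1 && decide (st.2 < PySem.Str.len pr.1) then
        (some pr.2, PySem.Str.len pr.1)
      else st)
    (none, -1)).1

-- ===== PORT B =====
-- literal transliteration of Source B: sorted(locations.items(), key=len of path, reverse=True),
-- then the early-returning for-loop is the first match (List.find?), returning its root_dir
def match_location_alt (locations : List (String × String)) (uri : String) : Option String :=
  ((PySem.List.sorted locations (fun item => PySem.Str.len item.1) true).find?
      (fun pr => PySem.Str.startswith uri pr.1)).map (·.2)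

-- ===== PRECONDITION & SPEC =====
def Spec_match_location (locations : List (String × String)) (uri : String) (out : Option String) : Prop := out = match_location_alt locations uri
instance (locations : List (String × String)) (uri : String) (out : Option String) : Decidable (Spec_match_location locations uri out) := by unfold Spec_match_location; infer_instance

-- ===== CLAIM (what is proved, stated in full; the proofs are below) =====
def Claim_equal_match_location : Prop := ∀ (locations : List (String × String)) (uri : String), Dom_match_location locations uri → Spec_match_location locations uri (match_location locations uri)

-- ===== LEMMAS AND PROOFS =====

-- find? after inserting x into a key-descending list: x wins exactly when it matches and
-- the previous first match (if any) has strictly smaller key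
theorem find?_insertBy_desc {α : Type} (key : α → Int) (p : α → Bool) (x : α) :
    ∀ (l : List α), l.Pairwise (fun a b => key b ≤ key a) →
      (PySem.List.insertBy (fun a b => decide (key b < key a)) x l).find? p
        = (if p x then
            (match l.find? p with
             | none => some x
             | some z => if key x ≤ key z then some z else some x)
           else l.find? p) := by
  intro l
  induction l with
  | nil =>
    intro _
    by_cases hp : p x <;> simp [PySem.List.insertBy, List.find?, hp]
  | cons y ys ih =>
    intro hpw
    have hy : ∀ b ∈ ys, key b ≤ key y := (List.pairwise_cons.mp hpw).1
    have hys : ys.Pairwise (fun a b => key b ≤ key a) := (List.pairwise_cons.mp hpw).2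
    simp only [PySem.List.insertBy]
    by_cases hlt : key y < key x
    · rw [if_pos (by simpa using hlt)]
      by_cases hp : p x
      · cases hf : (y :: ys).find? p with
        | none => simp [List.find?, hp]
        | some z =>
          have hz : z ∈ y :: ys := List.mem_of_find?_eq_some hf
          have hkz : key z ≤ key y := by
            rcases List.mem_cons.mp hz with h | h
            · exact h ▸ le_refl _
            · exact hy z h
          have hnx : ¬ key x ≤ key z := by omega
          simp [List.find?, hp, hnx]
      · simp [List.find?, hp]
    · rw [if_neg (by simpa using hlt)]
      have hxy : key x ≤ key y := by omega
      by_cases hpy : p y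
      · by_cases hp : p x <;> simp [List.find?, hpy, hxy, hp]
      · simp only [List.find?, hpy]
        rw [ih hys]

-- the descending insertion-sort accumulator (what sorted … true folds with)
def pvSortAcc (locations : List (String × String)) : List (String × String) :=
  locations.foldl
    (fun acc x => PySem.List.insertBy
      (fun a b => decide (PySem.Str.len b.1 < PySem.Str.len a.1)) x acc) []

theorem pvSortAcc_eq (locations : List (String × String)) :
    pvSortAcc locations
      = PySem.List.sorted locations (fun item => PySem.Str.len item.1) true := by
  rw [PySem.List.sorted_rev_eq_foldl_insertBy]; rfl

theorem pvSortAcc_pairwise (locations : List (String × String)) :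
    (pvSortAcc locations).Pairwise
      (fun a b => PySem.Str.len b.1 ≤ PySem.Str.len a.1) := by
  rw [pvSortAcc_eq]
  exact PySem.List.sorted_pairwise_rev locations (fun item => PySem.Str.len item.1)

-- loop invariant: A's running state is determined by the first match of the sorted prefix
set_option maxHeartbeats 1000000 in
theorem fold_eq_find (uri : String) (locations : List (String × String)) :
    locations.foldl
      (fun (st : Option String × Int) pr =>
        if PySem.Str.startswith uri pr.1 && decide (st.2 < PySem.Str.len pr.1) then
          (some pr.2, PySem.Str.len pr.1)
        else st)
      (none, -1)
    = (match (pvSortAcc locations).find? (fun pr => PySem.Str.startswith uri pr.1) with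
       | none => (none, -1)
       | some z => (some z.2, PySem.Str.len z.1)) := by
  induction locations using List.reverseRecOn with
  | nil => rfl
  | append_singleton ys x ih =>
    have hS : pvSortAcc (ys ++ [x])
        = PySem.List.insertBy
            (fun a b => decide (PySem.Str.len b.1 < PySem.Str.len a.1)) x
            (pvSortAcc ys) := by
      simp [pvSortAcc, List.foldl_append]
    rw [List.foldl_append, ih, List.foldl_cons, List.foldl_nil, hS,
      find?_insertBy_desc (fun pr => PySem.Str.len pr.1)
        (fun pr => PySem.Str.startswith uri pr.1) x _ (pvSortAcc_pairwise ys)]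
    have hx0 : (0:Int) ≤ PySem.Str.len x.1 := by rw [PySem.Str.len_eq]; positivity
    cases hf : (pvSortAcc ys).find? (fun pr => PySem.Str.startswith uri pr.1) with
    | none =>
      simp only []
      by_cases hp : PySem.Str.startswith uri x.1 = true
      · rw [if_pos hp]
        have hc : (PySem.Str.startswith uri x.1
            && decide ((((none : Option String), (-1 : Int)) : Option String × Int).2
                        < PySem.Str.len x.1)) = true := by
          rw [hp, Bool.true_and, decide_eq_true_eq]; omega
        rw [if_pos hc]
      · rw [if_neg hp]
        have hc : (PySem.Str.startswith uri x.1
            && decide ((((none : Option String), (-1 : Int)) : Option String × Int).2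
                        < PySem.Str.len x.1)) = false := by
          rw [Bool.not_eq_true] at hp; rw [hp, Bool.false_and]
        rw [hc]; rfl
    | some z =>
      simp only []
      by_cases hp : PySem.Str.startswith uri x.1 = true
      · rw [if_pos hp]
        by_cases hle : PySem.Str.len x.1 ≤ PySem.Str.len z.1
        · rw [if_pos hle]
          have hc : (PySem.Str.startswith uri x.1
              && decide ((((some z.2 : Option String), PySem.Str.len z.1)
                            : Option String × Int).2 < PySem.Str.len x.1)) = false := by
            rw [hp, Bool.true_and, decide_eq_false_iff_not]; omega
          rw [hc]; rfl
        · rw [if_neg hle]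
          have hc : (PySem.Str.startswith uri x.1
              && decide ((((some z.2 : Option String), PySem.Str.len z.1)
                            : Option String × Int).2 < PySem.Str.len x.1)) = true := by
            rw [hp, Bool.true_and, decide_eq_true_eq]; omega
          rw [if_pos hc]
      · rw [if_neg hp]
        have hc : (PySem.Str.startswith uri x.1
            && decide ((((some z.2 : Option String), PySem.Str.len z.1)
                          : Option String × Int).2 < PySem.Str.len x.1)) = false := by
          rw [Bool.not_eq_true] at hp; rw [hp, Bool.false_and]
        rw [hc]; rfl

-- ===== VERDICT (by name: the statement is the Claim_ definition above) =====
theorem match_location_spec : Claim_equal_match_location := by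
  intro locations uri _
  unfold Spec_match_location match_location match_location_alt
  rw [fold_eq_find uri locations, ← pvSortAcc_eq locations]
  cases hf : (pvSortAcc locations).find? (fun pr => PySem.Str.startswith uri pr.1) with
  | none => rfl
  | some z => rfl
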